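-- pv_equiv track=rewrite | github.com/thejuran/dvc-dashboard | backend/api/point_charts.py | _parse_room_key
-- ===== SOURCE A (Python) =====
-- def _humanize(slug: str) -> str:
--     """Convert underscore-separated slug to Title Case."""
--     return slug.replace("_", " ").title()
--
-- def _parse_room_key(room_key: str, view_categories: list[str]) -> dict:
--     """Parse a room key into room_type and view components.
--
--     Tries to match the longest view_category suffix first.
--     E.g., 'deluxe_studio_theme_park' with view_categories=['standard', 'theme_park']
--     -> room_type='Deluxe Studio', view='Theme Park'
--     """
--     for view in sorted(view_categories, key=len, reverse=True):
--         if room_key.endswith(f"_{view}"):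
--             room_type_slug = room_key[: -(len(view) + 1)]  # strip _view
--             return {
--                 "key": room_key,
--                 "room_type": _humanize(room_type_slug),
--                 "view": _humanize(view),
--             }
--     # Fallback: treat entire key as room type with unknown view
--     return {"key": room_key, "room_type": _humanize(room_key), "view": "Standard"}
-- ===== SOURCE B (Python) =====
-- def _humanize(slug: str) -> str:
--     """Convert underscore-separated slug to Title Case."""
--     return slug.replace("_", " ").title()
--
-- def _parse_room_key(room_key: str, view_categories: list[str]) -> dict:
--     """Parse a room key into room_type and view components.
--
--     Single pass over view_categories tracking the longest matching suffix
--     (no sort needed; strict > keeps the first of equal-length matches,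
--     though equal-length matching suffixes are necessarily the same string).
--     """
--     best = None
--     for view in view_categories:
--         if room_key.endswith("_" + view) and (best is None or len(view) > len(best)):
--             best = view
--     if best is None:
--         return {"key": room_key, "room_type": _humanize(room_key), "view": "Standard"}
--     return {
--         "key": room_key,
--         "room_type": _humanize(room_key.removesuffix("_" + best)),
--         "view": _humanize(best),
--     }
-- ===== Notes on version B (the rewrite author's own statement) =====
-- stated objective: simpler
-- what changed: Dropped the length-descending sort; B makes one pass over view_categories keeping the longest matching suffix with a running best (strict >), then strips it with removesuffix.
import Mathlib
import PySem

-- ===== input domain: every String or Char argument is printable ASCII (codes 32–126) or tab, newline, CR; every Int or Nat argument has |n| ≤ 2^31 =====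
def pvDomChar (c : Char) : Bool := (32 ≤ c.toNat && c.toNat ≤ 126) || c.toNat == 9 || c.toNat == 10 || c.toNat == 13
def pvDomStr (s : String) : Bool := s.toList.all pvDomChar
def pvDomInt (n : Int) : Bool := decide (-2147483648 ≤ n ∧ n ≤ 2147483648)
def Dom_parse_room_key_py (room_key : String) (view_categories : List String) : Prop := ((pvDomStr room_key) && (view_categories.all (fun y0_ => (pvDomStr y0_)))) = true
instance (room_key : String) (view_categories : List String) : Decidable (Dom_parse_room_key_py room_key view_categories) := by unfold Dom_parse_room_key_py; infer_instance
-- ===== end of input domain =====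

-- B replaces A's length-descending sort + first-match scan by one pass keeping the
-- longest matching suffix (simpler; same results).

-- ===== PORT A =====
-- str.title() ported by hand (PySem has no title): exact on the ASCII domain, where
-- 'cased' = letter; a letter is uppercased after a non-letter, lowercased after a letter.
def pvIsAlpha (c : Char) : Bool := (97 ≤ c.toNat && c.toNat ≤ 122) || (65 ≤ c.toNat && c.toNat ≤ 90)
def pvUp (c : Char) : Char := if 97 ≤ c.toNat && c.toNat ≤ 122 then Char.ofNat (c.toNat - 32) else c
def pvLow (c : Char) : Char := if 65 ≤ c.toNat && c.toNat ≤ 90 then Char.ofNat (c.toNat + 32) else c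
def pvTitle : List Char → Bool → List Char
  | [], _ => []
  | c :: rest, prev =>
    if pvIsAlpha c then (if prev then pvLow c else pvUp c) :: pvTitle rest true
    else c :: pvTitle rest false

-- _humanize (shared verbatim by A and B): slug.replace("_", " ").title()
def pvHumanize (s : List Char) : String := String.ofList (pvTitle (PySem.Chars.replace s ['_'] [' ']) false)

-- the for-loop: first view in the (sorted) list with room_key.endswith("_" + view)
def pvFindFirst (rk : List Char) : List String → Option String
  | [] => none
  | v :: rest => if PySem.Chars.endswith rk ('_' :: v.toList) then some v else pvFindFirst rk rest

def parse_room_key_py (room_key : String) (view_categories : List String) : List (String × String) :=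
  match pvFindFirst room_key.toList
      (PySem.List.sorted view_categories (fun v => PySem.Str.len v) true) with
  | some v =>
      -- room_type_slug = room_key[: -(len(view) + 1)]
      let slug := PySem.List.slice room_key.toList none (some (-((v.toList.length : Int) + 1)))
      [("key", room_key), ("room_type", pvHumanize slug), ("view", pvHumanize v.toList)]
  | none => [("key", room_key), ("room_type", pvHumanize room_key.toList), ("view", "Standard")]

-- ===== PORT B =====
-- one pass, running best (strict >)
def pvBestGo (rk : List Char) (best : Option String) : List String → Option String
  | [] => best
  | v :: rest =>
      pvBestGo rk
        (if PySem.Chars.endswith rk ('_' :: v.toList) &&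
            (match best with
             | none => true
             | some b => decide (b.toList.length < v.toList.length)) then some v else best)
        rest

def parse_room_key_py_alt (room_key : String) (view_categories : List String) : List (String × String) :=
  match pvBestGo room_key.toList none view_categories with
  | none => [("key", room_key), ("room_type", pvHumanize room_key.toList), ("view", "Standard")]
  | some v =>
      -- room_key.removesuffix("_" + best)
      let slug := room_key.toList.take (room_key.toList.length - v.toList.length - 1)
      [("key", room_key), ("room_type", pvHumanize slug), ("view", pvHumanize v.toList)]

-- ===== PRECONDITION & SPEC =====
def Spec_parse_room_key_py (room_key : String) (view_categories : List String) (out : List (String × String)) : Prop := out = parse_room_key_py_alt room_key view_categories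
instance (room_key : String) (view_categories : List String) (out : List (String × String)) : Decidable (Spec_parse_room_key_py room_key view_categories out) := by unfold Spec_parse_room_key_py; infer_instance

-- ===== CLAIM (what is proved, stated in full; the proofs are below) =====
def Claim_equal_parse_room_key_py : Prop := ∀ (room_key : String) (view_categories : List String), Dom_parse_room_key_py room_key view_categories → Spec_parse_room_key_py room_key view_categories (parse_room_key_py room_key view_categories)

-- ===== LEMMAS AND PROOFS =====

-- a matching view: "_" + v is a suffix of rk
def pvM (rk : List Char) (v : String) : Prop := PySem.Chars.endswith rk ('_' :: v.toList) = true

lemma pvFindFirst_none (rk : List Char) (l : List String)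
    (h : pvFindFirst rk l = none) : ∀ w ∈ l, ¬ pvM rk w := by
  induction l with
  | nil => simp
  | cons v rest ih =>
    intro w hw
    simp only [pvFindFirst] at h
    split at h
    · exact absurd h (by simp)
    · rcases List.mem_cons.mp hw with hw | hw
      · subst hw; simp only [pvM]; exact ‹¬ _›
      · exact ih h w hw

lemma pvFindFirst_some (rk : List Char) (l : List String) (v : String)
    (hp : l.Pairwise (fun a b => b.toList.length ≤ a.toList.length))
    (h : pvFindFirst rk l = some v) :
    v ∈ l ∧ pvM rk v ∧ ∀ w ∈ l, pvM rk w → w.toList.length ≤ v.toList.length := by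
  induction l with
  | nil => simp [pvFindFirst] at h
  | cons u rest ih =>
    simp only [pvFindFirst] at h
    rcases List.pairwise_cons.mp hp with ⟨hu, hrest⟩
    split at h
    · obtain rfl : u = v := by simpa using h
      refine ⟨List.mem_cons_self, ‹_›, ?_⟩
      intro w hw _
      rcases List.mem_cons.mp hw with hw | hw
      · subst hw; exact le_refl _
      · exact hu w hw
    · obtain ⟨hv, hMv, hmax⟩ := ih hrest h
      refine ⟨List.mem_cons_of_mem _ hv, hMv, ?_⟩
      intro w hw hMw
      rcases List.mem_cons.mp hw with hw | hw
      · subst hw; exact absurd hMw ‹¬ _›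
      · exact hmax w hw hMw

lemma pvBestGo_spec (rk : List Char) (l : List String) :
    ∀ best : Option String,
      (∀ b, best = some b → pvM rk b) →
      ((pvBestGo rk best l = none → best = none ∧ ∀ w ∈ l, ¬ pvM rk w) ∧
       (∀ v, pvBestGo rk best l = some v →
          pvM rk v ∧ (best = some v ∨ v ∈ l) ∧
          (∀ b, best = some b → b.toList.length ≤ v.toList.length) ∧
          (∀ w ∈ l, pvM rk w → w.toList.length ≤ v.toList.length))) := by
  induction l with
  | nil =>
    intro best hbest
    constructor
    · intro h; exact ⟨h, by simp⟩
    · intro v h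
      simp only [pvBestGo] at h
      exact ⟨hbest v h, Or.inl h, fun b hb => by rw [hb] at h; simp_all, by simp⟩
  | cons u rest ih =>
    intro best hbest
    by_cases hMu : PySem.Chars.endswith rk ('_' :: u.toList) = true
    · cases best with
      | none =>
        have hstep : pvBestGo rk none (u :: rest) = pvBestGo rk (some u) rest := by
          simp [pvBestGo, hMu]
        obtain ⟨ihn, ihs⟩ := ih (some u) (by intro b hb; cases hb; exact hMu)
        rw [hstep]
        constructor
        · intro h; exact absurd (ihn h).1 (by simp)
        · intro v h
          obtain ⟨hMv, hmem, hge, hmax⟩ := ihs v h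
          refine ⟨hMv, ?_, by simp, ?_⟩
          · rcases hmem with hmem | hmem
            · exact Or.inr (List.mem_cons.mpr (Or.inl (Option.some.inj hmem).symm))
            · exact Or.inr (List.mem_cons_of_mem _ hmem)
          · intro w hw hMw
            rcases List.mem_cons.mp hw with hw | hw
            · subst hw; exact hge w rfl
            · exact hmax w hw hMw
      | some b =>
        have hMb : pvM rk b := hbest b rfl
        by_cases hlt : b.toList.length < u.toList.length
        · have hstep : pvBestGo rk (some b) (u :: rest) = pvBestGo rk (some u) rest := by
            have h' : b.length < u.length := by simpa using hlt
            simp [pvBestGo, hMu, h']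
          obtain ⟨ihn, ihs⟩ := ih (some u) (by intro c hc; cases hc; exact hMu)
          rw [hstep]
          constructor
          · intro h; exact absurd (ihn h).1 (by simp)
          · intro v h
            obtain ⟨hMv, hmem, hge, hmax⟩ := ihs v h
            have huv : u.toList.length ≤ v.toList.length := hge u rfl
            refine ⟨hMv, ?_, ?_, ?_⟩
            · rcases hmem with hmem | hmem
              · exact Or.inr (List.mem_cons.mpr (Or.inl (Option.some.inj hmem).symm))
              · exact Or.inr (List.mem_cons_of_mem _ hmem)
            · intro c hc; cases hc; omega
            · intro w hw hMw
              rcases List.mem_cons.mp hw with hw | hw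
              · subst hw; exact huv
              · exact hmax w hw hMw
        · have hstep : pvBestGo rk (some b) (u :: rest) = pvBestGo rk (some b) rest := by
            have h' : ¬ b.length < u.length := by simpa using hlt
            simp [pvBestGo, hMu, h']
          obtain ⟨ihn, ihs⟩ := ih (some b) hbest
          rw [hstep]
          constructor
          · intro h; exact absurd (ihn h).1 (by simp)
          · intro v h
            obtain ⟨hMv, hmem, hge, hmax⟩ := ihs v h
            have hbv : b.toList.length ≤ v.toList.length := hge b rfl
            refine ⟨hMv, ?_, ?_, ?_⟩
            · rcases hmem with hmem | hmem
              · exact Or.inl hmem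
              · exact Or.inr (List.mem_cons_of_mem _ hmem)
            · intro c hc; cases hc; exact hbv
            · intro w hw hMw
              rcases List.mem_cons.mp hw with hw | hw
              · subst hw; omega
              · exact hmax w hw hMw
    · have hstep : pvBestGo rk best (u :: rest) = pvBestGo rk best rest := by
        cases best <;> simp [pvBestGo, hMu]
      obtain ⟨ihn, ihs⟩ := ih best hbest
      rw [hstep]
      constructor
      · intro h
        obtain ⟨h1, h2⟩ := ihn h
        refine ⟨h1, ?_⟩
        intro w hw
        rcases List.mem_cons.mp hw with hw | hw
        · subst hw; exact hMu
        · exact h2 w hw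
      · intro v h
        obtain ⟨hMv, hmem, hge, hmax⟩ := ihs v h
        refine ⟨hMv, ?_, hge, ?_⟩
        · rcases hmem with hmem | hmem
          · exact Or.inl hmem
          · exact Or.inr (List.mem_cons_of_mem _ hmem)
        · intro w hw hMw
          rcases List.mem_cons.mp hw with hw | hw
          · subst hw; exact absurd hMw hMu
          · exact hmax w hw hMw

-- equal-length suffixes of the same list are equal
lemma pv_suffix_eq_of_length {α : Type} (l s t : List α)
    (hs : s <:+ l) (ht : t <:+ l) (h : s.length = t.length) : s = t := by
  obtain ⟨a, ha⟩ := hs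
  obtain ⟨b, hb⟩ := ht
  have hab : a ++ s = b ++ t := ha.trans hb.symm
  have hl : a.length = b.length := by
    have := congrArg List.length hab; simp at this; omega
  exact List.append_inj_right hab hl

lemma pvM_len_le (rk : List Char) (v : String) (h : pvM rk v) :
    v.toList.length + 1 ≤ rk.length := by
  have := (PySem.Chars.endswith_iff rk ('_' :: v.toList)).mp h
  have := this.length_le
  simpa using this

lemma pv_slice_eq_take (rk : List Char) (n : Nat) (h : n + 1 ≤ rk.length) :
    PySem.List.slice rk none (some (-((n : Int) + 1))) = rk.take (rk.length - n - 1) := by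
  simp [PySem.List.slice, PySem.List.clampIdx]
  split_ifs <;> omega

-- ===== VERDICT (by name: the statement is the Claim_ definition above) =====
theorem parse_room_key_py_spec : Claim_equal_parse_room_key_py := by
  intro rk vcs _
  unfold Spec_parse_room_key_py parse_room_key_py parse_room_key_py_alt
  have hpair : (PySem.List.sorted vcs (fun v => PySem.Str.len v) true).Pairwise
      (fun a b => b.toList.length ≤ a.toList.length) := by
    have := PySem.List.sorted_pairwise_rev vcs (fun v => PySem.Str.len v)
    simpa [PySem.Str.len_eq, PySem.Chars.len_eq] using this
  cases hA : pvFindFirst rk.toList (PySem.List.sorted vcs (fun v => PySem.Str.len v) true) with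
  | none =>
    have hnone : ∀ w ∈ vcs, ¬ pvM rk.toList w := by
      intro w hw
      exact pvFindFirst_none _ _ hA w ((PySem.List.mem_sorted _ _ _ _).mpr hw)
    cases hB : pvBestGo rk.toList none vcs with
    | none => rfl
    | some v =>
      have := ((pvBestGo_spec rk.toList vcs none (by simp)).2 v hB)
      rcases this.2.1 with h | h
      · simp at h
      · exact absurd this.1 (hnone v h)
  | some v =>
    obtain ⟨hvmem, hMv, hmaxA⟩ := pvFindFirst_some rk.toList _ v hpair hA
    have hvmem' : v ∈ vcs := (PySem.List.mem_sorted _ _ _ _).mp hvmem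
    have hmaxA' : ∀ w ∈ vcs, pvM rk.toList w → w.toList.length ≤ v.toList.length := by
      intro w hw; exact hmaxA w ((PySem.List.mem_sorted _ _ _ _).mpr hw)
    cases hB : pvBestGo rk.toList none vcs with
    | none =>
      have := ((pvBestGo_spec rk.toList vcs none (by simp)).1 hB).2 v hvmem'
      exact absurd hMv this
    | some u =>
      obtain ⟨hMu, humem, _, hmaxB⟩ := (pvBestGo_spec rk.toList vcs none (by simp)).2 u hB
      have humem2 : u ∈ vcs := by rcases humem with h | h; exacts [absurd h (by simp), h]
      have hlen : v.toList.length = u.toList.length :=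
        le_antisymm (hmaxB v hvmem' hMv) (hmaxA' u humem2 hMu)
      have : ('_' :: v.toList) = ('_' :: u.toList) :=
        pv_suffix_eq_of_length rk.toList _ _
          ((PySem.Chars.endswith_iff _ _).mp hMv) ((PySem.Chars.endswith_iff _ _).mp hMu)
          (by simp [hlen])
      have huv : v = u := by
        have := List.cons.inj this
        exact String.ext (by simpa [String.toList] using this.2)
      subst huv
      simp only
      rw [pv_slice_eq_take rk.toList v.toList.length (pvM_len_le _ _ hMv)]
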